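-- pv_equiv track=rewrite | github.com/amoorkie/ai-skills | src/ai_skills_toolkit/skills/figma_ui_architect/skill.py | _derive_navigation_model
-- ===== SOURCE A (Python) =====
-- def _derive_navigation_model(screens: list[str]) -> list[str]:
--     navigation = ["Primary navigation: Overview -> operational workspaces -> settings/integrations."]
--     if any("Dashboard" in screen for screen in screens):
--         navigation.append("Landing route: Dashboard Overview for high-signal status and drill-down entry.")
--     if any("Queue" in screen or "List" in screen for screen in screens):
--         navigation.append("Operational route: Queue / List View as the main action-taking workspace.")
--     if any("Detail" in screen for screen in screens):
--         navigation.append("Deep-link route: Detail Workspace reachable from lists, alerts, and approval contexts.")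
--     if any("Settings" in screen for screen in screens):
--         navigation.append("Admin route: Settings and Rules isolated from day-to-day operations.")
--     return navigation[:5]
-- ===== SOURCE B (Python) =====
-- def _derive_navigation_model(screens: list[str]) -> list[str]:
--     has_dashboard = False
--     has_queue = False
--     has_detail = False
--     has_settings = False
--     for screen in screens:
--         if "Dashboard" in screen:
--             has_dashboard = True
--         if "Queue" in screen or "List" in screen:
--             has_queue = True
--         if "Detail" in screen:
--             has_detail = True
--         if "Settings" in screen:
--             has_settings = True
--     navigation = ["Primary navigation: Overview -> operational workspaces -> settings/integrations."]
--     if has_dashboard: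
--         navigation.append("Landing route: Dashboard Overview for high-signal status and drill-down entry.")
--     if has_queue:
--         navigation.append("Operational route: Queue / List View as the main action-taking workspace.")
--     if has_detail:
--         navigation.append("Deep-link route: Detail Workspace reachable from lists, alerts, and approval contexts.")
--     if has_settings:
--         navigation.append("Admin route: Settings and Rules isolated from day-to-day operations.")
--     return navigation
-- ===== Notes on version B (the rewrite author's own statement) =====
-- stated objective: alternative
-- what changed: Replaces four separate any(...) scans over screens with one pass that accumulates four category flags, then builds the fixed lines from the flags and drops the redundant [:5] slice (the list can never exceed 5 elements).
import Mathlib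
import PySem

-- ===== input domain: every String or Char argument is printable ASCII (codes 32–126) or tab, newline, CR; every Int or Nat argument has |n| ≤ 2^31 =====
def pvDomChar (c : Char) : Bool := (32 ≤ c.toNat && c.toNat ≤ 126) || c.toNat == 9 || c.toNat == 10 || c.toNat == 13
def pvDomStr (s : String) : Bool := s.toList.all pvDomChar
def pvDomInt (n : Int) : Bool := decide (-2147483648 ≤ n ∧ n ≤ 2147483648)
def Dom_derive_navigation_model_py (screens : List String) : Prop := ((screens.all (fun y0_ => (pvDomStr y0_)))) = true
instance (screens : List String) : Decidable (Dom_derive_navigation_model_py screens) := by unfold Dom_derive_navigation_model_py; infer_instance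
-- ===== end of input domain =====

-- B replaces A's four separate any(...) scans with one pass accumulating four flags,
-- then builds the lines from the flags and drops the redundant [:5] slice (alternative decomposition).

-- ===== PORT A =====
def derive_navigation_model_py (screens : List String) : List String :=
  let navigation := ["Primary navigation: Overview -> operational workspaces -> settings/integrations."]
  let navigation := if screens.any (fun screen => PySem.Str.isIn "Dashboard" screen) then
      navigation ++ ["Landing route: Dashboard Overview for high-signal status and drill-down entry."]
    else navigation
  let navigation := if screens.any (fun screen => PySem.Str.isIn "Queue" screen || PySem.Str.isIn "List" screen) then
      navigation ++ ["Operational route: Queue / List View as the main action-taking workspace."]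
    else navigation
  let navigation := if screens.any (fun screen => PySem.Str.isIn "Detail" screen) then
      navigation ++ ["Deep-link route: Detail Workspace reachable from lists, alerts, and approval contexts."]
    else navigation
  let navigation := if screens.any (fun screen => PySem.Str.isIn "Settings" screen) then
      navigation ++ ["Admin route: Settings and Rules isolated from day-to-day operations."]
    else navigation
  PySem.List.slice navigation none (some 5)

-- ===== PORT B =====
def derive_navigation_model_py_alt (screens : List String) : List String :=
  let flags := screens.foldl
    (fun (st : Bool × Bool × Bool × Bool) screen =>
      ( st.1 || PySem.Str.isIn "Dashboard" screen
      , st.2.1 || PySem.Str.isIn "Queue" screen || PySem.Str.isIn "List" screen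
      , st.2.2.1 || PySem.Str.isIn "Detail" screen
      , st.2.2.2 || PySem.Str.isIn "Settings" screen ))
    (false, false, false, false)
  let navigation := ["Primary navigation: Overview -> operational workspaces -> settings/integrations."]
  let navigation := if flags.1 then
      navigation ++ ["Landing route: Dashboard Overview for high-signal status and drill-down entry."]
    else navigation
  let navigation := if flags.2.1 then
      navigation ++ ["Operational route: Queue / List View as the main action-taking workspace."]
    else navigation
  let navigation := if flags.2.2.1 then
      navigation ++ ["Deep-link route: Detail Workspace reachable from lists, alerts, and approval contexts."]
    else navigation
  let navigation := if flags.2.2.2 then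
      navigation ++ ["Admin route: Settings and Rules isolated from day-to-day operations."]
    else navigation
  navigation

-- ===== PRECONDITION & SPEC =====
def Spec_derive_navigation_model_py (screens : List String) (out : List String) : Prop := out = derive_navigation_model_py_alt screens
instance (screens : List String) (out : List String) : Decidable (Spec_derive_navigation_model_py screens out) := by unfold Spec_derive_navigation_model_py; infer_instance

-- ===== CLAIM (what is proved, stated in full; the proofs are below) =====
def Claim_equal_derive_navigation_model_py : Prop := ∀ (screens : List String), Dom_derive_navigation_model_py screens → Spec_derive_navigation_model_py screens (derive_navigation_model_py screens)

-- ===== LEMMAS AND PROOFS =====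

-- The one-pass fold computes the four `any` scans.
theorem navFold_eq_any (screens : List String) (a b c d : Bool) :
    screens.foldl
      (fun (st : Bool × Bool × Bool × Bool) screen =>
        ( st.1 || PySem.Str.isIn "Dashboard" screen
        , st.2.1 || PySem.Str.isIn "Queue" screen || PySem.Str.isIn "List" screen
        , st.2.2.1 || PySem.Str.isIn "Detail" screen
        , st.2.2.2 || PySem.Str.isIn "Settings" screen ))
      (a, b, c, d)
    = ( a || screens.any (fun s => PySem.Str.isIn "Dashboard" s)
      , b || screens.any (fun s => PySem.Str.isIn "Queue" s || PySem.Str.isIn "List" s)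
      , c || screens.any (fun s => PySem.Str.isIn "Detail" s)
      , d || screens.any (fun s => PySem.Str.isIn "Settings" s) ) := by
  induction screens generalizing a b c d with
  | nil => simp
  | cons x xs ih =>
    simp only [List.foldl_cons, List.any_cons, ih]
    simp [Bool.or_assoc]

-- ===== VERDICT (by name: the statement is the Claim_ definition above) =====
theorem derive_navigation_model_py_spec : Claim_equal_derive_navigation_model_py := by
  intro screens _
  unfold Spec_derive_navigation_model_py derive_navigation_model_py derive_navigation_model_py_alt
  rw [navFold_eq_any]
  simp only [Bool.false_or]
  rcases screens.any (fun s => PySem.Str.isIn "Dashboard" s) <;>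
    rcases screens.any (fun s => PySem.Str.isIn "Queue" s || PySem.Str.isIn "List" s) <;>
    rcases screens.any (fun s => PySem.Str.isIn "Detail" s) <;>
    rcases screens.any (fun s => PySem.Str.isIn "Settings" s) <;>
    simp [PySem.List.slice]
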